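-- pv_equiv track=rewrite | github.com/hozzun/u-on_algolism_study | 진아영/4월/0405/[Lv2]PGM_더맵게.py | solution
-- ===== SOURCE A (Python) =====
-- from heapq import heappop, heappush, heapify
--
-- def solution(scoville, K):
--     answer = 0
--     # heap_s = []
--
--     # 힙큐에 push
--     # for i in scoville:
--     #     heappush(heap_s, i)
--     heapify(scoville)
--
--     # while min(scoville) < K and len(scoville) >= 2:
--     while scoville[0] < K and len(scoville) >= 2:
--
--         first = heappop(scoville)
--         second = heappop(scoville)
--         heappush(scoville, first + second * 2)
--         answer += 1
--
--     # if min(scoville) < K: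
--     if scoville[0] < K:
--         answer = -1
--
--     return answer
-- ===== SOURCE B (Python) =====
-- def _insort(l, x):
--     # insert x into sorted list l, after any equal elements (linear scan)
--     i = 0
--     while i < len(l) and l[i] <= x:
--         i += 1
--     l.insert(i, x)
--
-- def solution(scoville, K):
--     scoville.sort()
--     answer = 0
--     while scoville[0] < K and len(scoville) >= 2:
--         first = scoville.pop(0)
--         second = scoville.pop(0)
--         _insort(scoville, first + second * 2)
--         answer += 1
--     if scoville[0] < K:
--         answer = -1
--     return answer
-- ===== Notes on version B (the rewrite author's own statement) =====
-- stated objective: simpler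
-- what changed: Replaces the binary heap with a sorted list: sort once, pop the two smallest from the front, and reinsert the mix by a linear ordered insertion, so no heap machinery is needed.
import Mathlib
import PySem

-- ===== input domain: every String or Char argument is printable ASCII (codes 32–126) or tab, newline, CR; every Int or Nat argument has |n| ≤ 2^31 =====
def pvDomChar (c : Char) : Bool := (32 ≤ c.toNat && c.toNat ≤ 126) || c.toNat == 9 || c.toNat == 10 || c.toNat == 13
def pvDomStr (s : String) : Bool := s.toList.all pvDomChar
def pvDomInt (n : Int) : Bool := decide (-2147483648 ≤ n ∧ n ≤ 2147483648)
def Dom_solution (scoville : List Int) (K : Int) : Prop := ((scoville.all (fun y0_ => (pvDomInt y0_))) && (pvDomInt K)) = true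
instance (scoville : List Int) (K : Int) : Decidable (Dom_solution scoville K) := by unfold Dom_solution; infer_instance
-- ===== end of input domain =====

-- B replaces A's binary heap with a sorted list (sort once, pop the two smallest from the
-- front, reinsert by ordered insertion): simpler, no heap machinery. Return-value equivalence
-- only: both Pythons mutate the `scoville` argument in place, but in different ways
-- (A leaves a heap permutation, B a sorted remainder).

-- ===== PORT A =====
-- A calls heapq (heapify / heappop / heappush), a stdlib module PySem does not cover; it is
-- ported by its heap contract, which is exact for everything A observes of the heap:
-- scoville[0] of a heap is its minimum value, heappop returns and removes that minimum,
-- heappush adds its item, and heapify only rearranges (the multiset of values is unchanged,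
-- so it is the identity on the contents A's loop consumes value-by-value).
def pvHeapRoot (h : List Int) : Int :=
  match PySem.List.min? h (fun x => x) with
  | some m => m
  | none => 0  -- unreachable: A reads scoville[0] only on a nonempty heap (Pre_ excludes [])

lemma pvHeapRoot_mem {h : List Int} (hne : h ≠ []) : pvHeapRoot h ∈ h := by
  unfold pvHeapRoot
  rcases hm : PySem.List.min? h (fun x => x) with _ | m
  · exact absurd ((PySem.List.min?_eq_none_iff _ _).1 hm) hne
  · simpa using PySem.List.min?_mem hm

-- A's while-loop (condition `scoville[0] < K and len(scoville) >= 2`) with the trailing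
-- `if scoville[0] < K: answer = -1` as its exit branch; heappop = take the minimum.
def loopA (K : Int) (h : List Int) (answer : Int) : Int :=
  if pvHeapRoot h < K ∧ 2 ≤ h.length then
    let first := pvHeapRoot h
    let h1 := h.erase first
    let second := pvHeapRoot h1
    let h2 := h1.erase second
    loopA K (h2 ++ [first + second * 2]) (answer + 1)
  else if pvHeapRoot h < K then -1 else answer
termination_by h.length
decreasing_by
  rename_i hc
  have hne : h ≠ [] := by intro he; subst he; simp at hc
  have h1m := pvHeapRoot_mem hne
  have l1 : (h.erase (pvHeapRoot h)).length = h.length - 1 := List.length_erase_of_mem h1m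
  have h1ne : h.erase (pvHeapRoot h) ≠ [] := by
    intro he; rw [← List.length_eq_zero_iff] at he; omega
  have h2m := pvHeapRoot_mem h1ne
  have l2 := List.length_erase_of_mem h2m
  simp only [List.length_append, List.length_cons, List.length_nil, l2, l1]
  omega

def solution (scoville : List Int) (K : Int) : Int :=
  loopA K scoville 0

-- ===== PORT B =====
-- Source B's _insort: linear scan past the elements ≤ x, then insert x there.
def insortLin (l : List Int) (x : Int) : List Int :=
  match l with
  | [] => [x]
  | a :: t => if a ≤ x then a :: insortLin t x else x :: a :: t

lemma length_insortLin (l : List Int) (x : Int) : (insortLin l x).length = l.length + 1 := by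
  induction l with
  | nil => rfl
  | cons a t ih => unfold insortLin; split <;> simp [ih]

-- B's while-loop on the sorted list: pop the two front elements, reinsert their mix.
def loopB (K : Int) (l : List Int) (answer : Int) : Int :=
  match l with
  | a :: b :: t =>
    if a < K then loopB K (insortLin t (a + b * 2)) (answer + 1)
    else answer
  | [a] => if a < K then -1 else answer
  | [] => 0  -- unreachable: B reads scoville[0]; Pre_ excludes the empty list
termination_by l.length
decreasing_by simp [length_insortLin]

def solution_alt (scoville : List Int) (K : Int) : Int :=
  loopB K (PySem.List.sorted scoville (fun x => x) false) 0

-- ===== PRECONDITION & SPEC =====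
-- Both Pythons raise IndexError on scoville = [] (reading scoville[0]); Pre_ excludes exactly that.
def Pre_solution (scoville : List Int) (K : Int) : Prop := scoville ≠ []
instance (scoville : List Int) (K : Int) : Decidable (Pre_solution scoville K) := by unfold Pre_solution; infer_instance

def pvWitness_solution : List Int × Int := ([1, 2, 3, 9, 10, 12], 7)

def Spec_solution (scoville : List Int) (K : Int) (out : Int) : Prop := out = solution_alt scoville K
instance (scoville : List Int) (K : Int) (out : Int) : Decidable (Spec_solution scoville K out) := by unfold Spec_solution; infer_instance

-- ===== CLAIM (what is proved, stated in full; the proofs are below) =====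
def Claim_equal_solution : Prop := ∀ (scoville : List Int) (K : Int), Dom_solution scoville K → Pre_solution scoville K → Spec_solution scoville K (solution scoville K)

-- ===== LEMMAS AND PROOFS =====

lemma pvHeapRoot_eq {h : List Int} {m : Int} (hmem : m ∈ h) (hmin : ∀ y ∈ h, m ≤ y) :
    pvHeapRoot h = m := by
  have hne : h ≠ [] := by intro he; subst he; simp at hmem
  unfold pvHeapRoot
  rcases hm : PySem.List.min? h (fun x => x) with _ | m'
  · exact absurd ((PySem.List.min?_eq_none_iff _ _).1 hm) hne
  · have h1 : m' ∈ h := PySem.List.min?_mem hm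
    have h2 := PySem.List.min?_isMin hm
    simpa using le_antisymm (h2 m hmem) (hmin m' h1)

lemma insortLin_perm (l : List Int) (x : Int) : (insortLin l x).Perm (x :: l) := by
  induction l with
  | nil => rfl
  | cons a t ih =>
    unfold insortLin
    split
    · exact ((ih.cons a).trans (List.Perm.swap x a t)).symm.symm
    · rfl

lemma insortLin_sorted {l : List Int} (x : Int) (hs : l.Pairwise (· ≤ ·)) :
    (insortLin l x).Pairwise (· ≤ ·) := by
  induction l with
  | nil => simp [insortLin]
  | cons a t ih =>
    rcases List.pairwise_cons.1 hs with ⟨ha, ht⟩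
    unfold insortLin
    split
    · rename_i hax
      refine List.pairwise_cons.2 ⟨?_, ih ht⟩
      intro y hy
      rcases List.mem_cons.1 ((insortLin_perm t x).mem_iff.1 hy) with hyx | hyt
      · subst hyx; exact hax
      · exact ha y hyt
    · rename_i hax
      refine List.pairwise_cons.2 ⟨?_, hs⟩
      intro y hy
      rcases List.mem_cons.1 hy with hya | hyt
      · subst hya; omega
      · have := ha y hyt; omega

lemma insortLin_ne_nil (l : List Int) (x : Int) : insortLin l x ≠ [] := by
  intro he
  have := length_insortLin l x
  rw [he] at this
  simp at this

-- The common invariant: A's heap h and B's sorted list s hold the same multiset.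
lemma loop_eq (K : Int) : ∀ n (h s : List Int) (answer : Int),
    h.length = n → s.Perm h → s.Pairwise (· ≤ ·) → s ≠ [] →
    loopA K h answer = loopB K s answer := by
  intro n
  induction n using Nat.strong_induction_on with
  | _ n ih =>
    intro h s answer hlen hperm hsort hne
    match s, hne with
    | [a], _ =>
      have hh : h = [a] := (List.perm_singleton.1 hperm.symm)
      subst hh
      have hr : pvHeapRoot [a] = a := pvHeapRoot_eq (by simp) (by simp)
      unfold loopA loopB
      simp [hr]
    | a :: b :: t, _ =>
      have hlen2 : h.length = t.length + 2 := by
        have := hperm.length_eq; simpa using this.symm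
      rcases List.pairwise_cons.1 hsort with ⟨ha, hsort'⟩
      rcases List.pairwise_cons.1 hsort' with ⟨hb, hsortt⟩
      -- first popped value is a
      have hamem : a ∈ h := hperm.mem_iff.1 (by simp)
      have hamin : ∀ y ∈ h, a ≤ y := by
        intro y hy
        rcases List.mem_cons.1 (hperm.symm.mem_iff.1 hy) with h1 | h1
        · omega
        · exact ha y h1
      have hra : pvHeapRoot h = a := pvHeapRoot_eq hamem hamin
      -- after erasing a, the rest is a permutation of b :: t
      have hperm1 : (b :: t).Perm (h.erase a) := by
        have := hperm.erase a
        simpa [List.erase_cons_head] using this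
      have hbmem : b ∈ h.erase a := hperm1.mem_iff.1 (by simp)
      have hbmin : ∀ y ∈ h.erase a, b ≤ y := by
        intro y hy
        rcases List.mem_cons.1 (hperm1.symm.mem_iff.1 hy) with h1 | h1
        · omega
        · exact hb y h1
      have hrb : pvHeapRoot (h.erase a) = b := pvHeapRoot_eq hbmem hbmin
      have hperm2 : t.Perm ((h.erase a).erase b) := by
        have := hperm1.erase b
        simpa [List.erase_cons_head] using this
      -- the two next states are again permutations of each other
      have hpermN : (insortLin t (a + b * 2)).Perm (((h.erase a).erase b) ++ [a + b * 2]) := by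
        refine (insortLin_perm t (a + b * 2)).trans ?_
        refine ((hperm2.cons (a + b * 2)).trans ?_)
        exact (List.perm_append_singleton _ _).symm
      have hlen1 : (h.erase a).length = t.length + 1 := by
        rw [List.length_erase_of_mem hamem]; omega
      have hlenN : (((h.erase a).erase b) ++ [a + b * 2]).length = t.length + 1 := by
        rw [List.length_append, List.length_erase_of_mem hbmem]
        simp [hlen1]
      by_cases hcond : a < K
      · -- both loops iterate
        rw [loopA, loopB]
        have hc : pvHeapRoot h < K ∧ 2 ≤ h.length := ⟨by rw [hra]; exact hcond, by omega⟩
        rw [if_pos hc, if_pos hcond]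
        simp only [hra, hrb]
        exact ih (t.length + 1) (by omega) _ _ _ hlenN hpermN
          (insortLin_sorted _ hsortt) (insortLin_ne_nil _ _)
      · -- both loops stop; a ≥ K so the -1 branch is not taken either
        rw [loopA, loopB]
        have hc : ¬ (pvHeapRoot h < K ∧ 2 ≤ h.length) := by rw [hra]; tauto
        rw [if_neg hc, if_neg (by rw [hra]; exact hcond), if_neg hcond]

-- ===== VERDICT (by name: the statement is the Claim_ definition above) =====
theorem solution_spec : Claim_equal_solution := by
  intro scoville K _ hpre
  unfold Spec_solution solution solution_alt
  have hsp := PySem.List.sorted_perm (xs := scoville) (key := fun x => x) (rev := false)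
  have hss := PySem.List.sorted_pairwise (xs := scoville) (key := fun x => x)
  have hne : PySem.List.sorted scoville (fun x => x) false ≠ [] := by
    intro he; exact hpre ((PySem.List.sorted_eq_nil_iff _ _ _).1 he)
  exact loop_eq K scoville.length scoville _ 0 rfl hsp (by simpa using hss) hne
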